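-- pv_equiv track=rewrite | github.com/GmYu-1221/comfyui-path-video-loader | __init__.py | _choose_best_path
-- ===== SOURCE A (Python) =====
-- from typing import Any, List, Optional, Sequence
--
-- def _choose_best_path(paths: Sequence[Any]) -> str:
--     """
--     Given a list/tuple of candidate paths, choose the best video file path.
--
--     Priority:
--       1) .mp4 without '-audio' suffix
--       2) other common video formats
--       3) fallback: last entry stringified
--     """
--     # Normalize to str list
--     s_paths = [p for p in paths if isinstance(p, str) and p.strip()]
--
--     # 1) Prefer normal mp4 (not -audio)
--     mp4s = [p for p in s_paths if p.lower().endswith(".mp4") and "-audio" not in p.lower()]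
--     if mp4s:
--         return mp4s[-1]
--
--     # 2) Other common video formats
--     exts = (".mp4", ".mov", ".mkv", ".webm", ".avi")
--     vids = [p for p in s_paths if p.lower().endswith(exts)]
--     if vids:
--         return vids[-1]
--
--     # 3) Fallback: last item
--     if s_paths:
--         return s_paths[-1]
--     return str(paths[-1]) if len(paths) > 0 else ""
-- ===== SOURCE B (Python) =====
-- def _choose_best_path(paths):
--     """Single forward pass keeping the latest match of each tier."""
--     last_mp4 = last_vid = last_any = None
--     for p in paths:
--         if not (isinstance(p, str) and p.strip()):
--             continue
--         low = p.lower()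
--         if low.endswith(".mp4") and "-audio" not in low:
--             last_mp4 = p
--         if low.endswith((".mp4", ".mov", ".mkv", ".webm", ".avi")):
--             last_vid = p
--         last_any = p
--     if last_mp4 is not None:
--         return last_mp4
--     if last_vid is not None:
--         return last_vid
--     if last_any is not None:
--         return last_any
--     return str(paths[-1]) if len(paths) > 0 else ""
-- ===== Notes on version B (the rewrite author's own statement) =====
-- stated objective: faster
-- what changed: Replaces the three intermediate filtered lists (s_paths, mp4s, vids) with one forward pass that keeps the latest match of each priority tier in three variables.
import Mathlib
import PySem

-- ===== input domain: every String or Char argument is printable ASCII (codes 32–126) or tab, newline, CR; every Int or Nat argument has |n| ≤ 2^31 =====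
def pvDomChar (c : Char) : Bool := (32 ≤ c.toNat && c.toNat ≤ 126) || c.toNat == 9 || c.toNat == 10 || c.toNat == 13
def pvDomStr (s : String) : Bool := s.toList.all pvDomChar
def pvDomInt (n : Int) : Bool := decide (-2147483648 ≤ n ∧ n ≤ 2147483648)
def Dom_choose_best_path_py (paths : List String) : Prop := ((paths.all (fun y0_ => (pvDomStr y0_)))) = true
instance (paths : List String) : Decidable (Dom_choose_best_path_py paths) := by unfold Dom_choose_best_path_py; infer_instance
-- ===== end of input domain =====

-- B replaces A's three intermediate filtered lists by one forward pass keeping the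
-- latest match of each priority tier (constant-factor change; same O(n) asymptotics).

-- shared predicate helpers (used verbatim by both ports)
def pvNonWS (p : String) : Bool := !(PySem.Str.strip p == "")
def pvIsMp4 (p : String) : Bool :=
  PySem.Str.endswith (PySem.Str.lower p) ".mp4" && !(PySem.Str.isIn "-audio" (PySem.Str.lower p))
def pvIsVid (p : String) : Bool :=
  PySem.Str.endswith (PySem.Str.lower p) ".mp4" || PySem.Str.endswith (PySem.Str.lower p) ".mov" ||
  PySem.Str.endswith (PySem.Str.lower p) ".mkv" || PySem.Str.endswith (PySem.Str.lower p) ".webm" ||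
  PySem.Str.endswith (PySem.Str.lower p) ".avi"

-- ===== PORT A =====
def choose_best_path_py (paths : List String) : String :=
  let s_paths := paths.filter pvNonWS
  let mp4s := s_paths.filter pvIsMp4
  if mp4s ≠ [] then mp4s.getLastD ""
  else
    let vids := s_paths.filter pvIsVid
    if vids ≠ [] then vids.getLastD ""
    else if s_paths ≠ [] then s_paths.getLastD ""
    else if paths.length > 0 then paths.getLastD "" else ""

-- ===== PORT B =====
def pvStep (acc : Option String × Option String × Option String) (p : String) :
    Option String × Option String × Option String :=
  if pvNonWS p then
    ((if pvIsMp4 p then some p else acc.1),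
     (if pvIsVid p then some p else acc.2.1),
     some p)
  else acc

def choose_best_path_py_alt (paths : List String) : String :=
  let st := paths.foldl pvStep (none, none, none)
  match st.1 with
  | some m => m
  | none =>
    match st.2.1 with
    | some v => v
    | none =>
      match st.2.2 with
      | some a => a
      | none => if paths.length > 0 then paths.getLastD "" else ""

-- ===== PRECONDITION & SPEC =====
def Spec_choose_best_path_py (paths : List String) (out : String) : Prop := out = choose_best_path_py_alt paths
instance (paths : List String) (out : String) : Decidable (Spec_choose_best_path_py paths out) := by unfold Spec_choose_best_path_py; infer_instance

-- ===== CLAIM (what is proved, stated in full; the proofs are below) =====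
def Claim_equal_choose_best_path_py : Prop := ∀ (paths : List String), Dom_choose_best_path_py paths → Spec_choose_best_path_py paths (choose_best_path_py paths)

-- ===== LEMMAS AND PROOFS =====

-- the fold's three components are the last matching element of each tier (or the initial value)
theorem pvFold_char (paths : List String) (init : Option String × Option String × Option String) :
    paths.foldl pvStep init =
      ((((paths.filter pvNonWS).filter pvIsMp4).getLast?).or init.1,
       (((paths.filter pvNonWS).filter pvIsVid).getLast?).or init.2.1,
       ((paths.filter pvNonWS).getLast?).or init.2.2) := by
  induction paths using List.reverseRecOn generalizing init with
  | nil => simp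
  | append_singleton l x ih =>
    rw [List.foldl_append, ih]
    simp only [List.foldl_cons, List.foldl_nil, List.filter_append, List.filter_cons,
      List.filter_nil, pvStep]
    by_cases hw : pvNonWS x <;> by_cases hm : pvIsMp4 x <;> by_cases hv : pvIsVid x <;>
      simp [hw, hm, hv, Option.or]

theorem choose_best_path_py_eq (paths : List String) :
    choose_best_path_py paths = choose_best_path_py_alt paths := by
  unfold choose_best_path_py choose_best_path_py_alt
  rw [pvFold_char]
  simp only [Option.or_none]
  rcases h1 : ((paths.filter pvNonWS).filter pvIsMp4).getLast? with _ | m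
  · have e1 := List.getLast?_eq_none_iff.mp h1
    rw [if_neg (by simp [e1])]
    rcases h2 : ((paths.filter pvNonWS).filter pvIsVid).getLast? with _ | v
    · have e2 := List.getLast?_eq_none_iff.mp h2
      rw [if_neg (by simp [e2])]
      rcases h3 : (paths.filter pvNonWS).getLast? with _ | a
      · have e3 := List.getLast?_eq_none_iff.mp h3
        rw [if_neg (by simp [e3])]
      · have hne : paths.filter pvNonWS ≠ [] := by intro h; simp [h] at h3
        rw [if_pos hne, List.getLastD_eq_getLast?, h3]; rfl
    · have hne : (paths.filter pvNonWS).filter pvIsVid ≠ [] := by intro h; simp [h] at h2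
      rw [if_pos hne, List.getLastD_eq_getLast?, h2]; rfl
  · have hne : (paths.filter pvNonWS).filter pvIsMp4 ≠ [] := by intro h; simp [h] at h1
    rw [if_pos hne, List.getLastD_eq_getLast?, h1]; rfl

-- ===== VERDICT (by name: the statement is the Claim_ definition above) =====
theorem choose_best_path_py_spec : Claim_equal_choose_best_path_py := by
  intro paths _
  unfold Spec_choose_best_path_py
  exact choose_best_path_py_eq paths
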